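-- pv_equiv track=rewrite | github.com/Keilan/advent-of-code | 2015/Day01/day1.py | determine_floor
-- ===== SOURCE A (Python) =====
-- def determine_floor(directions):
--     floor = 0
--     for c in directions:
--         if c == '(':
--             floor += 1
--         else:
--             floor -= 1
--
--     return floor
-- ===== SOURCE B (Python) =====
-- def determine_floor(directions):
--     # Closed form: each '(' contributes +1, every other char -1,
--     # so the result is opens - (n - opens) = 2*opens - n.
--     return 2 * directions.count('(') - len(directions)
-- ===== Notes on version B (the rewrite author's own statement) =====
-- stated objective: simpler
-- what changed: Replaced the branch-and-accumulate loop with a closed arithmetic formula over string statistics: twice the count of open parens minus the length (subtracting the length, not the close-paren count, keeps the behaviour that every non-open character decrements).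
import Mathlib
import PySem

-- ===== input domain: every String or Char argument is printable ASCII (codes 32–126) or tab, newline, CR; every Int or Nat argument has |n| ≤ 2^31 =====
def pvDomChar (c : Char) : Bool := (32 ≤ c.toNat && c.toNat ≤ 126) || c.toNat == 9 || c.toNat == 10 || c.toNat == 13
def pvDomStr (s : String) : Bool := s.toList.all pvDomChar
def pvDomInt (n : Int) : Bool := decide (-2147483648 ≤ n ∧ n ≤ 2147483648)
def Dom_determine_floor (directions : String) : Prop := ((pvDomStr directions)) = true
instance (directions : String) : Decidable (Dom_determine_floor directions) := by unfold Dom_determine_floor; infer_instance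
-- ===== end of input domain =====

-- B replaces A's per-character branch-and-accumulate loop with the closed formula 2*count('(') - len (simpler).

-- ===== PORT A =====
-- literal port of A: accumulate over the characters, +1 on '(', else -1
def determine_floor (directions : String) : Int :=
  directions.toList.foldl (fun floor c => if c = '(' then floor + 1 else floor - 1) 0

-- ===== PORT B =====
-- literal port of B: 2 * directions.count('(') - len(directions)
def determine_floor_alt (directions : String) : Int :=
  2 * (PySem.Str.count directions "(" : Int) - (PySem.Str.len directions : Int)

-- ===== PRECONDITION & SPEC =====
def Spec_determine_floor (directions : String) (out : Int) : Prop := out = determine_floor_alt directions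
instance (directions : String) (out : Int) : Decidable (Spec_determine_floor directions out) := by unfold Spec_determine_floor; infer_instance

-- ===== CLAIM (what is proved, stated in full; the proofs are below) =====
def Claim_equal_determine_floor : Prop := ∀ (directions : String), Dom_determine_floor directions → Spec_determine_floor directions (determine_floor directions)

-- ===== LEMMAS AND PROOFS =====
-- substring count of a one-character pattern is List.count (fuel version of Chars.count.go)
theorem chars_count_go_single (c : Char) (l : List Char) (fuel acc : Nat) (h : l.length ≤ fuel) :
    PySem.Chars.count.go [c] fuel l acc = acc + l.count c := by
  induction l generalizing fuel acc with
  | nil => cases fuel <;> simp [PySem.Chars.count.go]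
  | cons x t ih =>
      cases fuel with
      | zero => simp at h
      | succ n =>
        simp only [List.length_cons, Nat.succ_le_succ_iff] at h
        by_cases hc : x = c
        · simp [PySem.Chars.count.go, List.isPrefixOf, hc, ih _ _ h]; omega
        · simp [PySem.Chars.count.go, List.isPrefixOf, hc, ih _ _ h]
          exact fun h' => hc h'.symm

theorem chars_count_single (c : Char) (s : List Char) :
    PySem.Chars.count s [c] = s.count c := by
  simp [PySem.Chars.count, chars_count_go_single c s s.length 0 le_rfl]

-- A's loop in closed form
theorem determine_floor_fold (l : List Char) (acc : Int) :
    l.foldl (fun floor c => if c = '(' then floor + 1 else floor - 1) acc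
      = acc + 2 * (l.count '(' : Int) - (l.length : Int) := by
  induction l generalizing acc with
  | nil => simp
  | cons c t ih =>
      simp only [List.foldl_cons, List.count_cons, List.length_cons, ih]
      by_cases h : c = '('
      · simp [h]; ring
      · simp [h, fun h' : '(' = c => h h'.symm]; ring

-- ===== VERDICT (by name: the statement is the Claim_ definition above) =====
theorem determine_floor_spec : Claim_equal_determine_floor := by
  intro directions _
  show _ = _
  rw [determine_floor, determine_floor_alt, determine_floor_fold]
  simp [PySem.Str.count, PySem.Str.len, chars_count_single]
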